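-- pv_equiv track=rewrite | github.com/masodori/interactive-web-scraper | src/scraper/utils/selectors.py | find_common_ancestor_selector
-- ===== SOURCE A (Python) =====
-- from typing import Optional, List, Tuple
--
-- def split_selector(selector: str) -> List[str]:
--     """
--     Split compound selector into individual parts.
--
--     Args:
--         selector: CSS selector
--
--     Returns:
--         List of selector parts
--     """
--     # Handle different combinators
--     parts = []
--     current = ""
--     in_brackets = False
--
--     for char in selector:
--         if char == '[':
--             in_brackets = True
--             current += char
--         elif char == ']':
--             in_brackets = False
--             current += char
--         elif char in ' >+~' and not in_brackets:
--             if current: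
--                 parts.append(current)
--             if char != ' ':
--                 parts.append(char)
--             current = ""
--         else:
--             current += char
--
--     if current:
--         parts.append(current)
--
--     return [p for p in parts if p.strip()]
--
-- def find_common_ancestor_selector(selectors: List[str]) -> Optional[str]:
--     """
--     Find common ancestor selector from list of selectors.
--
--     Args:
--         selectors: List of CSS selectors
--
--     Returns:
--         Common ancestor selector or None
--     """
--     if not selectors:
--         return None
--
--     if len(selectors) == 1:
--         return selectors[0]
--
--     # Split all selectors into parts
--     all_parts = [split_selector(sel) for sel in selectors]
--
--     # Find common prefix
--     common_parts = []
--
--     for i in range(min(len(parts) for parts in all_parts)):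
--         current_parts = [parts[i] for parts in all_parts]
--
--         # Check if all parts at this position are the same
--         if all(part == current_parts[0] for part in current_parts):
--             common_parts.append(current_parts[0])
--         else:
--             break
--
--     if common_parts:
--         return ' '.join(common_parts)
--
--     return None
-- ===== SOURCE B (Python) =====
-- from typing import Optional, List
--
-- def split_selector(selector: str) -> List[str]:
--     """Split compound selector into individual parts."""
--     parts = []
--     current = ""
--     in_brackets = False
--     for char in selector:
--         if char == '[':
--             in_brackets = True
--             current += char
--         elif char == ']':
--             in_brackets = False
--             current += char
--         elif char in ' >+~' and not in_brackets:
--             if current: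
--                 parts.append(current)
--             if char != ' ':
--                 parts.append(char)
--             current = ""
--         else:
--             current += char
--     if current:
--         parts.append(current)
--     return [p for p in parts if p.strip()]
--
-- def _common_prefix(xs: List[str], ys: List[str]) -> List[str]:
--     """Longest common prefix of two token lists (recursive)."""
--     if xs and ys and xs[0] == ys[0]:
--         return [xs[0]] + _common_prefix(xs[1:], ys[1:])
--     return []
--
-- def find_common_ancestor_selector(selectors: List[str]) -> Optional[str]:
--     """Find common ancestor selector from list of selectors."""
--     if not selectors:
--         return None
--     if len(selectors) == 1:
--         return selectors[0]
--     first, *rest = selectors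
--     prefix = split_selector(first)
--     for sel in rest:
--         prefix = _common_prefix(prefix, split_selector(sel))
--     return ' '.join(prefix) if prefix else None
-- ===== Notes on version B (the rewrite author's own statement) =====
-- stated objective: alternative
-- what changed: The columnar loop (scan every selector at each index position, with min-length bound and break) is replaced by a pairwise fold: a recursive two-list common-prefix helper is folded over the remaining selectors' token lists, progressively shrinking the running prefix.
import Mathlib
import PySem

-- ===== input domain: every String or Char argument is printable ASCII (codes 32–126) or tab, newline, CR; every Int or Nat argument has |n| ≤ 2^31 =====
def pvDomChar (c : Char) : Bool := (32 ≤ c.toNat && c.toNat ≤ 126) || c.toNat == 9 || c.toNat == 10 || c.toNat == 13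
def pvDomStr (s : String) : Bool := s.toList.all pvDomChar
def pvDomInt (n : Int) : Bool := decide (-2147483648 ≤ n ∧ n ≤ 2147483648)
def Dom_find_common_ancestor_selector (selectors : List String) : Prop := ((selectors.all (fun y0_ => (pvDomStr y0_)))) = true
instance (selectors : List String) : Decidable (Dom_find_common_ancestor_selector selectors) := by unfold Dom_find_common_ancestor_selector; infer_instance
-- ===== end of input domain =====

-- B replaces A's columnar index loop (compare all selectors at each position, bounded by the
-- minimum length) with a fold of a two-list common-prefix helper over the selectors' token lists;
-- same cost, different decomposition (objective: alternative).

-- ===== PORT A =====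
-- split_selector, shared verbatim by both Pythons (identical code in Source A and Source B)
def splitStep (state : List String × String × Bool) (c : Char) : List String × String × Bool :=
  let (parts, current, in_brackets) := state
  if c == '[' then (parts, current.push c, true)
  else if c == ']' then (parts, current.push c, false)
  else if (c == ' ' || c == '>' || c == '+' || c == '~') && !in_brackets then
    let parts := if current ≠ "" then parts ++ [current] else parts
    let parts := if c != ' ' then parts ++ [String.ofList [c]] else parts
    (parts, "", in_brackets)
  else (parts, current.push c, in_brackets)

def splitSelector (selector : String) : List String :=
  let st := selector.toList.foldl splitStep ([], "", false)
  let parts := if st.2.1 ≠ "" then st.1 ++ [st.2.1] else st.1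
  parts.filter (fun p => PySem.Str.strip p != "")

-- A's `for i in range(min …)` loop with break; fuel = the min length, i the running index.
-- `parts[i]` is in range (i < min of the lengths), ported as pyGetD.
def aLoop (all_parts : List (List String)) : Nat → Nat → List String → List String
  | 0, _, acc => acc
  | fuel+1, i, acc =>
    let current_parts := all_parts.map (fun parts => PySem.List.pyGetD parts (i : Int) "")
    let c0 := PySem.List.pyGetD current_parts 0 ""
    if current_parts.all (fun part => part == c0) then
      aLoop all_parts fuel (i+1) (acc ++ [c0])
    else acc

def find_common_ancestor_selector (selectors : List String) : Option String :=
  match selectors with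
  | [] => none
  | [s] => some s
  | _ =>
    let all_parts := selectors.map splitSelector
    -- min(len(parts) for parts in all_parts): all_parts is nonempty here, so min? is `some`
    let n := (PySem.List.min? (all_parts.map List.length) (fun x => x)).getD 0
    let common_parts := aLoop all_parts n 0 []
    if common_parts.isEmpty then none else some (PySem.Str.join " " common_parts)

-- ===== PORT B =====
def commonPrefix : List String → List String → List String
  | x :: xs, y :: ys => if x == y then x :: commonPrefix xs ys else []
  | _, _ => []

def find_common_ancestor_selector_alt (selectors : List String) : Option String :=
  match selectors with
  | [] => none
  | s :: rest =>
    if rest.isEmpty then some s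
    else
      let pref := rest.foldl (fun acc sel => commonPrefix acc (splitSelector sel)) (splitSelector s)
      if pref.isEmpty then none else some (PySem.Str.join " " pref)

-- ===== PRECONDITION & SPEC =====
def Spec_find_common_ancestor_selector (selectors : List String) (out : Option String) : Prop := out = find_common_ancestor_selector_alt selectors
instance (selectors : List String) (out : Option String) : Decidable (Spec_find_common_ancestor_selector selectors out) := by unfold Spec_find_common_ancestor_selector; infer_instance

-- ===== CLAIM (what is proved, stated in full; the proofs are below) =====
def Claim_equal_find_common_ancestor_selector : Prop := ∀ (selectors : List String), Dom_find_common_ancestor_selector selectors → Spec_find_common_ancestor_selector selectors (find_common_ancestor_selector selectors)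

-- ===== LEMMAS AND PROOFS =====

-- columnar common prefix: the common reference point of both loops
def col : List String → List (List String) → List String
  | [], _ => []
  | x :: xs, ts =>
    if ts.all (fun t => t.head? == some x) then x :: col xs (ts.map List.tail) else []

lemma col_nil (a : List String) : col a [] = a := by
  induction a with
  | nil => rfl
  | cons x xs ih => simp [col, ih]

lemma col_of_mem_nil (a : List String) (ts : List (List String)) (h : [] ∈ ts) :
    col a ts = [] := by
  cases a with
  | nil => rfl
  | cons x xs =>
    simp only [col]
    rw [if_neg]
    intro hall
    rw [List.all_eq_true] at hall
    have := hall [] h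
    simp at this

lemma commonPrefix_col (a : List String) : ∀ (b : List String) (ts : List (List String)),
    col (commonPrefix a b) ts = col a (b :: ts) := by
  induction a with
  | nil => intro b ts; cases b <;> simp [commonPrefix, col]
  | cons x xs ih =>
    intro b ts
    cases b with
    | nil => simp [commonPrefix, col]
    | cons y ys =>
      by_cases hxy : x = y
      · subst hxy
        simp only [commonPrefix, beq_self_eq_true, if_true, col, List.all_cons,
          List.head?_cons, beq_self_eq_true, Bool.true_and, List.map_cons,
          List.tail_cons]
        by_cases hall : ts.all (fun t => t.head? == some x)
        · simp [hall, ih]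
        · simp [hall]
      · simp [commonPrefix, col, hxy, Ne.symm hxy]

lemma foldl_commonPrefix (ts : List (List String)) : ∀ (a : List String),
    ts.foldl commonPrefix a = col a ts := by
  induction ts with
  | nil => intro a; simp [col_nil]
  | cons t ts ih => intro a; simp only [List.foldl_cons, ih, commonPrefix_col]

lemma aLoop_eq (fuel : Nat) : ∀ (i : Nat) (acc t0 : List String) (ts : List (List String)),
    (∀ t ∈ t0 :: ts, i + fuel ≤ t.length) →
    (∃ t ∈ t0 :: ts, t.length = i + fuel) →
    aLoop (t0 :: ts) fuel i acc = acc ++ col (t0.drop i) (ts.map (·.drop i)) := by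
  induction fuel with
  | zero =>
    intro i acc t0 ts _ hex
    obtain ⟨t, hmem, hlen⟩ := hex
    rcases List.mem_cons.mp hmem with h | h
    · subst h
      simp [aLoop, List.drop_of_length_le (show t.length ≤ i by omega), col]
    · have : (List.drop i t) = [] := List.drop_of_length_le (by omega)
      have hmem' : ([] : List String) ∈ ts.map (·.drop i) := by
        rw [← this]; exact List.mem_map_of_mem h
      simp [aLoop, col_of_mem_nil _ _ hmem']
  | succ fuel ih =>
    intro i acc t0 ts hle hex
    have h0 : i < t0.length := by have := hle t0 (by simp); omega
    have hts : ∀ t ∈ ts, i < t.length := by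
      intro t ht; have := hle t (by simp [ht]); omega
    have hgd : ∀ (t : List String) (ht : i < t.length), t.getD i "" = t[i]'ht := by
      intro t ht; simp [List.getD_eq_getElem?_getD, List.getElem?_eq_getElem ht]
    have hdrop : t0.drop i = t0[i] :: t0.drop (i+1) := List.drop_eq_getElem_cons h0
    simp only [aLoop, List.map_cons, PySem.List.pyGetD_natCast,
      PySem.List.pyGetD_zero_cons, List.all_cons, beq_self_eq_true, Bool.true_and]
    have hcond : (ts.map (fun t => t.getD i "")).all (fun part => part == t0.getD i "")
        = (ts.map (·.drop i)).all (fun t => t.head? == some (t0[i])) := by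
      simp only [List.all_map]
      rw [Bool.eq_iff_iff, List.all_eq_true, List.all_eq_true]
      constructor <;> intro hh t ht <;> have hti := hts t ht <;>
        have := hh t ht <;>
        simp only [Function.comp_apply, hgd t hti, hgd t0 h0, List.head?_drop,
          List.getElem?_eq_getElem hti] at this ⊢ <;> simpa using this
    have step : ∀ t ∈ t0 :: ts, i + 1 + fuel ≤ t.length := by
      intro t ht; have := hle t ht; omega
    have step2 : ∃ t ∈ t0 :: ts, t.length = i + 1 + fuel := by
      obtain ⟨t, hm, hl⟩ := hex; exact ⟨t, hm, by omega⟩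
    have hmap : ts.map (List.tail ∘ fun x => List.drop i x) = ts.map (fun x => List.drop (i+1) x) := by
      simp [Function.comp_def, List.tail_drop]
    rw [hcond, hgd t0 h0, hdrop]
    simp only [col, List.map_map]
    by_cases hall : ((ts.map (fun x => List.drop i x)).all (fun t => t.head? == some (t0[i]'h0))) = true
    · rw [if_pos hall, if_pos hall, ih (i+1) (acc ++ [t0[i]'h0]) t0 ts step step2, hmap]
      simp
    · rw [if_neg hall, if_neg hall]
      simp

theorem find_common_ancestor_selector_spec_aux (selectors : List String) :
    find_common_ancestor_selector selectors = find_common_ancestor_selector_alt selectors := by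
  match selectors with
  | [] => rfl
  | [s] => rfl
  | s :: t :: rest =>
    show (let all_parts := (s :: t :: rest).map splitSelector
          let n := (PySem.List.min? (all_parts.map List.length) (fun x => x)).getD 0
          let common_parts := aLoop all_parts n 0 []
          if common_parts.isEmpty then none else some (PySem.Str.join " " common_parts)) = _
    set t0 := splitSelector s with ht0
    set ts := (t :: rest).map splitSelector with hts
    have hne : (t0 :: ts).map List.length ≠ [] := by simp
    obtain ⟨m, hm⟩ : ∃ m, PySem.List.min? ((t0 :: ts).map List.length) (fun x => x) = some m := by
      cases h : PySem.List.min? ((t0 :: ts).map List.length) (fun x => x) with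
      | none => exact absurd ((PySem.List.min?_eq_none_iff _ _).mp h) hne
      | some m => exact ⟨m, rfl⟩
    have hle : ∀ u ∈ t0 :: ts, 0 + m ≤ u.length := by
      intro u hu
      have := PySem.List.min?_isMin hm u.length (List.mem_map_of_mem hu)
      omega
    have hex : ∃ u ∈ t0 :: ts, u.length = 0 + m := by
      have := PySem.List.min?_mem hm
      obtain ⟨u, hu, hul⟩ := List.mem_map.mp this
      exact ⟨u, hu, by omega⟩
    have hA : aLoop (t0 :: ts) m 0 [] = col t0 ts := by
      rw [aLoop_eq m 0 [] t0 ts hle hex]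
      simp
    have hB : rest.foldl (fun acc sel => commonPrefix acc (splitSelector sel))
        (commonPrefix t0 (splitSelector t)) = col t0 ts := by
      have : ts.foldl commonPrefix t0 = col t0 ts := foldl_commonPrefix ts t0
      rw [hts] at this
      simpa [List.foldl_map] using this
    simp only [List.map_cons] at hm
    simp only [List.map_cons, ← ht0, ← hts, hm, Option.getD_some, hA,
      find_common_ancestor_selector_alt, List.foldl_cons, List.isEmpty_cons]
    rw [hB]
    simp

-- ===== VERDICT (by name: the statement is the Claim_ definition above) =====
theorem find_common_ancestor_selector_spec : Claim_equal_find_common_ancestor_selector := by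
  intro selectors _
  exact find_common_ancestor_selector_spec_aux selectors
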